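-- pv_equiv track=rewrite | github.com/ERATOMMSD/roadsearch | roadsearch/generators/representations/cartesian_generator.py | deltas_to_points
-- ===== SOURCE A (Python) =====
-- def deltas_to_points(deltas):
--     res = []
--     x0, y0 = 0, 0
--     for x,y in deltas:
--         x0+=x
--         y0+=y
--         res.append((x0, y0))
--     return res
-- ===== SOURCE B (Python) =====
-- from itertools import accumulate
--
-- def deltas_to_points(deltas):
--     xs = [x for x, y in deltas]
--     ys = [y for x, y in deltas]
--     return list(zip(accumulate(xs), accumulate(ys)))
-- ===== Notes on version B (the rewrite author's own statement) =====
-- stated objective: idiomatic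
-- what changed: Replaces the interleaved running-total loop over pairs with two independent per-axis prefix sums via itertools.accumulate, recombined with zip.
import Mathlib
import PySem

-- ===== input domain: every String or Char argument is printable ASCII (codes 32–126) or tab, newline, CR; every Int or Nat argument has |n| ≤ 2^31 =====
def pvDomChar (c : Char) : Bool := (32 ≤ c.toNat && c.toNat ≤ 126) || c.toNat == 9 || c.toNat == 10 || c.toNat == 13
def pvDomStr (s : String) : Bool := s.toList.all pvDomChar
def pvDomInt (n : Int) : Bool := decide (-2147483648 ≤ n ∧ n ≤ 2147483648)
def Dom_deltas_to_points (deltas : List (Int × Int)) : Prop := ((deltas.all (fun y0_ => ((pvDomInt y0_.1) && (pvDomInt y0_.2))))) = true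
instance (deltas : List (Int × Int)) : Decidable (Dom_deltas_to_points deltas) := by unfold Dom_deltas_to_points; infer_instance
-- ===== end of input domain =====

-- B replaces A's interleaved running-total loop with two independent per-axis prefix sums recombined by zip (idiomatic decomposition; same cost).

-- ===== PORT A =====
-- literal port of A: one loop carrying (res, x0, y0)
def deltas_to_points (deltas : List (Int × Int)) : List (Int × Int) :=
  (deltas.foldl
    (fun (st : List (Int × Int) × Int × Int) (p : Int × Int) =>
      let x0 := st.2.1 + p.1
      let y0 := st.2.2 + p.2
      (st.1 ++ [(x0, y0)], x0, y0))
    ([], 0, 0)).1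

-- ===== PORT B =====
-- port of itertools.accumulate (running sums, no initial element)
def pvAccumulate (s : Int) : List Int → List Int
  | [] => []
  | a :: t => (s + a) :: pvAccumulate (s + a) t

def deltas_to_points_alt (deltas : List (Int × Int)) : List (Int × Int) :=
  let xs := deltas.map (fun p => p.1)
  let ys := deltas.map (fun p => p.2)
  (pvAccumulate 0 xs).zip (pvAccumulate 0 ys)

-- ===== PRECONDITION & SPEC =====
def Spec_deltas_to_points (deltas : List (Int × Int)) (out : List (Int × Int)) : Prop := out = deltas_to_points_alt deltas
instance (deltas : List (Int × Int)) (out : List (Int × Int)) : Decidable (Spec_deltas_to_points deltas out) := by unfold Spec_deltas_to_points; infer_instance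

-- ===== CLAIM (what is proved, stated in full; the proofs are below) =====
def Claim_equal_deltas_to_points : Prop := ∀ (deltas : List (Int × Int)), Dom_deltas_to_points deltas → Spec_deltas_to_points deltas (deltas_to_points deltas)

-- ===== LEMMAS AND PROOFS =====

theorem deltas_to_points_loop (deltas : List (Int × Int)) :
    ∀ (res : List (Int × Int)) (x0 y0 : Int),
    (deltas.foldl
      (fun (st : List (Int × Int) × Int × Int) (p : Int × Int) =>
        let x0 := st.2.1 + p.1
        let y0 := st.2.2 + p.2
        (st.1 ++ [(x0, y0)], x0, y0))
      (res, x0, y0)).1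
    = res ++ (pvAccumulate x0 (deltas.map (fun p => p.1))).zip
              (pvAccumulate y0 (deltas.map (fun p => p.2))) := by
  induction deltas with
  | nil => intro res x0 y0; simp [pvAccumulate]
  | cons p t ih =>
      intro res x0 y0
      simp only [List.foldl_cons, List.map_cons, pvAccumulate, List.zip_cons_cons]
      rw [ih]
      simp

-- ===== VERDICT (by name: the statement is the Claim_ definition above) =====
theorem deltas_to_points_spec : Claim_equal_deltas_to_points := by
  intro deltas _
  unfold Spec_deltas_to_points deltas_to_points deltas_to_points_alt
  simpa using deltas_to_points_loop deltas [] 0 0
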